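-- pv_equiv track=rewrite | github.com/sahelsb/aoc | src/task9.py | count_free_blocks
-- ===== SOURCE A (Python) =====
-- def count_free_blocks(disk):
--     free_blocks = {}
--     count = 0
--     for i in range(len(disk)):
--         if disk[i] == '.':
--             index = i
--             count +=1
--         elif disk[i] != '.' and count != 0:
--             if count not in free_blocks:
--                 free_blocks[count] = []
--                 free_blocks[count].append(index)
--                 count = 0
--             else:
--                 free_blocks[count].append(index)
--                 count = 0
--     return free_blocks
-- ===== SOURCE B (Python) =====
-- def count_free_blocks(disk):
--     # Two-phase: first split disk into maximal runs (value, start, length),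
--     # then record each '.' run that does not reach the end of the disk,
--     # keyed by its length, storing the run's last index.
--     n = len(disk)
--     runs = []
--     i = 0
--     while i < n:
--         j = i
--         while j < n and disk[j] == disk[i]:
--             j += 1
--         runs.append((disk[i], i, j - i))
--         i = j
--     free_blocks = {}
--     for val, start, length in runs:
--         end = start + length - 1
--         if val == '.' and end != n - 1:
--             free_blocks.setdefault(length, []).append(end)
--     return free_blocks
-- ===== Notes on version B (the rewrite author's own statement) =====
-- stated objective: alternative
-- what changed: Replaces A's single pass with per-element count/index state by a two-phase run-length decomposition: first split the disk into maximal runs (value, start, length), then record each '.' run not reaching the end of the disk into the dict keyed by run length.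
import Mathlib
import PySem

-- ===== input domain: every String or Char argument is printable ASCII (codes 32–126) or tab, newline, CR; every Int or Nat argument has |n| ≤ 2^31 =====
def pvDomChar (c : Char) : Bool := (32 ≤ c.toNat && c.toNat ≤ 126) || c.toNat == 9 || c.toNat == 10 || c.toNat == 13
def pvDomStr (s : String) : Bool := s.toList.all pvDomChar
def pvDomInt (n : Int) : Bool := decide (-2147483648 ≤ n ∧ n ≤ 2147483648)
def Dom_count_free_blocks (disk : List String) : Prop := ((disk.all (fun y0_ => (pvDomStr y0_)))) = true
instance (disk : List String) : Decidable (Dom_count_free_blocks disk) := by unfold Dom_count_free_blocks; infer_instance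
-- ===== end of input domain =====

-- B's two-phase run-length re-implementation; equivalence of the return values is proved below.
-- ===== PORT A =====
-- one fold step of A's loop, on the pair (i, disk[i]); state = (free_blocks, count, index)
def pvStepA (st : PySem.Dict Int (List Int) × Int × Int) (p : Int × String) :
    PySem.Dict Int (List Int) × Int × Int :=
  if p.2 = "." then (st.1, st.2.1 + 1, p.1)
  else if p.2 ≠ "." ∧ st.2.1 ≠ 0 then
    (if st.1.contains st.2.1 then st.1.modify st.2.1 [] (fun l => l ++ [st.2.2])
     else (st.1.insert st.2.1 []).modify st.2.1 [] (fun l => l ++ [st.2.2]), 0, st.2.2)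
  else st

def count_free_blocks (disk : List String) : List (Int × List Int) :=
  ((PySem.List.pyRange 0 (disk.length : Int) 1).foldl
    (fun st i => pvStepA st (i, PySem.List.pyGetD disk i ""))
    (PySem.Dict.empty, 0, 0)).1.items

-- ===== PORT B =====
-- phase 1 of B: maximal runs of equal elements as (value, start index, length)
def pvRuns (xs : List String) (s : Int) : List (String × Int × Int) :=
  match xs with
  | [] => []
  | x :: rest =>
    (x, s, 1 + (rest.takeWhile (fun y => y == x)).length) ::
      pvRuns (rest.dropWhile (fun y => y == x))
             (s + (1 + (rest.takeWhile (fun y => y == x)).length))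
termination_by xs.length
decreasing_by
  simpa using Nat.lt_succ_of_le (List.length_dropWhile_le (fun y => y == x) rest)

-- phase 2 of B: one fold step over a run
def pvStepB (n : Int) (fb : PySem.Dict Int (List Int)) (r : String × Int × Int) :
    PySem.Dict Int (List Int) :=
  if r.1 = "." ∧ r.2.1 + r.2.2 - 1 ≠ n - 1 then
    fb.modify r.2.2 [] (fun l => l ++ [r.2.1 + r.2.2 - 1])
  else fb

def count_free_blocks_alt (disk : List String) : List (Int × List Int) :=
  ((pvRuns disk 0).foldl (pvStepB (disk.length : Int)) PySem.Dict.empty).items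

-- ===== PRECONDITION & SPEC =====
def Spec_count_free_blocks (disk : List String) (out : List (Int × List Int)) : Prop := out = count_free_blocks_alt disk
instance (disk : List String) (out : List (Int × List Int)) : Decidable (Spec_count_free_blocks disk out) := by unfold Spec_count_free_blocks; infer_instance

-- ===== CLAIM (what is proved, stated in full; the proofs are below) =====
def Claim_equal_count_free_blocks : Prop := ∀ (disk : List String), Dom_count_free_blocks disk → Spec_count_free_blocks disk (count_free_blocks disk)

-- ===== LEMMAS AND PROOFS =====

-- A's dict update (insert-empty-then-append on a missing key) is the single modify B uses
theorem pvStepDict (d : PySem.Dict Int (List Int)) (c x : Int) :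
    (if d.contains c then d.modify c [] (fun l => l ++ [x])
     else (d.insert c []).modify c [] (fun l => l ++ [x])) = d.modify c [] (fun l => l ++ [x]) := by
  by_cases h : d.contains c
  · simp [h]
  · have hc : d.contains c = false := by simpa using h
    rw [if_neg h]
    simp only [PySem.Dict.modify, PySem.Dict.getD_insert_self, PySem.Dict.insert_insert_self]
    rw [PySem.Dict.getD_of_not_contains d [] hc]

-- the head of a dropWhile tail fails the predicate
theorem pvDropHead (rest : List String) (x y : String) (tail : List String)
    (h : rest.dropWhile (fun z => z == x) = y :: tail) : y ≠ x := by
  induction rest with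
  | nil => simp at h
  | cons a r ih =>
    by_cases ha : (a == x) = true
    · rw [List.dropWhile_cons_of_pos (p := fun z => z == x) ha] at h; exact ih h
    · rw [List.dropWhile_cons_of_neg (p := fun z => z == x) ha] at h
      cases h; simpa using ha

-- A over a nonempty all-dot segment: count grows by the length, index ends at the last position
theorem pvDotRun (ds : List String) (h : ∀ y ∈ ds, y = ".") (hne : ds ≠ []) :
    ∀ (s : Int) (fb : PySem.Dict Int (List Int)) (c idx : Int),
    (PySem.List.enumerate ds s).foldl pvStepA (fb, c, idx)
      = (fb, c + (ds.length : Int), s + (ds.length : Int) - 1) := by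
  induction ds with
  | nil => exact absurd rfl hne
  | cons d ds' ih =>
    intro s fb c idx
    have hd : d = "." := h d (by simp)
    rcases List.eq_nil_or_concat ds' with h0 | _
    · subst h0
      simp [PySem.List.enumerate_cons, PySem.List.enumerate_nil, pvStepA, hd]
    · have hne' : ds' ≠ [] := by rintro rfl; simp_all
      rw [PySem.List.enumerate_cons, List.foldl_cons]
      have hstep : pvStepA (fb, c, idx) (s, d) = (fb, c + 1, s) := by simp [pvStepA, hd]
      rw [hstep, ih (fun y hy => h y (by simp [hy])) hne' (s + 1) fb (c + 1) s]
      simp only [Prod.mk.injEq, List.length_cons]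
      push_cast
      exact ⟨trivial, by ring, by ring⟩

-- A over an all-non-dot segment with count 0: no-op
theorem pvSkipRun (us : List String) (h : ∀ y ∈ us, y ≠ ".") :
    ∀ (s : Int) (fb : PySem.Dict Int (List Int)) (idx : Int),
    (PySem.List.enumerate us s).foldl pvStepA (fb, 0, idx) = (fb, 0, idx) := by
  induction us with
  | nil => intro s fb idx; simp [PySem.List.enumerate_nil]
  | cons u us' ih =>
    intro s fb idx
    have hu : u ≠ "." := h u (by simp)
    rw [PySem.List.enumerate_cons, List.foldl_cons]
    have hstep : pvStepA (fb, 0, idx) (s, u) = (fb, 0, idx) := by simp [pvStepA, hu]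
    rw [hstep, ih (fun y hy => h y (by simp [hy])) (s + 1) fb idx]

theorem pvMain (m : Nat) : ∀ (xs : List String), xs.length ≤ m → ∀ (s n : Int), n = s + (xs.length : Int) →
    ∀ (fb : PySem.Dict Int (List Int)) (idx : Int),
    ((PySem.List.enumerate xs s).foldl pvStepA (fb, 0, idx)).1
      = (pvRuns xs s).foldl (pvStepB n) fb := by
  induction m with
  | zero =>
    intro xs hlen s n hn fb idx
    have : xs = [] := List.length_eq_zero_iff.mp (Nat.le_zero.mp hlen)
    subst this
    simp [PySem.List.enumerate_nil, pvRuns]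
  | succ m ih =>
    intro xs hlen s n hn fb idx
    match xs, hlen, hn with
    | [], _, _ => simp [PySem.List.enumerate_nil, pvRuns]
    | x :: rest, hlen, hn =>
      have hrunB : pvRuns (x :: rest) s
          = (x, s, 1 + ((rest.takeWhile (fun y => y == x)).length : Int)) ::
            pvRuns (rest.dropWhile (fun y => y == x))
              (s + (1 + ((rest.takeWhile (fun y => y == x)).length : Int))) := by
        rw [pvRuns]
      set grp := rest.takeWhile (fun y => y == x) with hgrp
      set rest' := rest.dropWhile (fun y => y == x) with hrest'
      set L : Int := 1 + (grp.length : Int) with hLdef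
      have hgnn : (0 : Int) ≤ (grp.length : Int) := Int.natCast_nonneg _
      have hsplit : x :: rest = (x :: grp) ++ rest' := by
        simp [hgrp, hrest', List.takeWhile_append_dropWhile]
      have hgrpmem : ∀ y ∈ grp, y = x := by
        intro y hy
        rw [hgrp] at hy
        exact eq_of_beq (List.mem_takeWhile_imp (p := fun y => y == x) hy)
      have hlenr : rest'.length ≤ m := by
        have h1 := List.length_dropWhile_le (fun y => y == x) rest
        rw [← hrest'] at h1
        simp at hlen; omega
      have hcast : ((x :: grp).length : Int) = L := by
        rw [hLdef]; simp only [List.length_cons]; push_cast; ring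
      have hlen2 : ((x :: rest).length : Int) = L + (rest'.length : Int) := by
        conv_lhs => rw [hsplit]
        rw [← hcast]; push_cast [List.length_append]; ring
      conv_lhs => rw [hsplit, PySem.List.enumerate_append, List.foldl_append, hcast]
      rw [hrunB, List.foldl_cons]
      by_cases hx : x = "."
      · -- dot run
        have hdots : ∀ y ∈ x :: grp, y = "." := by
          intro y hy
          rcases List.mem_cons.mp hy with rfl | hy'
          · exact hx
          · rw [hgrpmem y hy']; exact hx
        rw [pvDotRun (x :: grp) hdots (by simp) s fb 0 idx, hcast, zero_add]
        set e : Int := s + L - 1 with he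
        cases hr : rest' with
        | nil =>
          -- trailing dot run: A never records it, B's end-index test skips it
          have hnval : e = n - 1 := by
            rw [he, hn, hlen2, hr]; simp
          have hB : pvStepB n fb (x, s, L) = fb := by
            simp only [pvStepB]
            rw [if_neg]
            rintro ⟨-, hcon⟩
            exact hcon (by rw [← he] at *; omega)
          rw [hB]
          simp [PySem.List.enumerate_nil, pvRuns]
        | cons y tail =>
          have hy : y ≠ x := pvDropHead rest x y tail (by rw [← hrest']; exact hr)
          have hyx : y ≠ "." := by rw [hx] at hy; exact hy
          have hL0 : L ≠ 0 := by rw [hLdef]; omega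
          set fb' := fb.modify L [] (fun l => l ++ [e]) with hfb'
          have hclose : pvStepA (fb, L, e) (s + L, y) = (fb', 0, e) := by
            simp only [pvStepA]
            rw [if_neg (by simpa using hyx), if_pos ⟨hyx, hL0⟩]
            rw [hfb']
            exact congrArg (fun d => (d, (0 : Int), e)) (pvStepDict fb L e)
          have hene : e ≠ n - 1 := by
            have : ((x :: rest).length : Int) = L + (tail.length : Int) + 1 := by
              rw [hlen2, hr]; simp only [List.length_cons]; push_cast; ring
            rw [he, hn, this]
            have := Int.natCast_nonneg tail.length
            omega
          have hB : pvStepB n fb (x, s, L) = fb' := by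
            simp only [pvStepB]
            rw [if_pos ⟨hx, by rw [← he] at *; exact hene⟩]
          rw [hB]
          -- use the IH on the whole of rest' = y :: tail, whose first step on y is a no-op
          have hIH := ih (y :: tail) (by rw [← hr]; exact hlenr) (s + L) n
            (by rw [hn, hlen2, hr]; simp only [List.length_cons]; push_cast; ring) fb' e
          rw [PySem.List.enumerate_cons, List.foldl_cons] at hIH
          have hnoop : pvStepA (fb', 0, e) (s + L, y) = (fb', 0, e) := by
            simp [pvStepA, hyx]
          rw [hnoop] at hIH
          rw [PySem.List.enumerate_cons, List.foldl_cons, hclose]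
          exact hIH
      · -- non-dot run: A does nothing (count is 0), B skips it
        have hnod : ∀ y ∈ x :: grp, y ≠ "." := by
          intro y hy
          rcases List.mem_cons.mp hy with rfl | hy'
          · exact hx
          · rw [hgrpmem y hy']; exact hx
        rw [pvSkipRun (x :: grp) hnod s fb idx]
        have hB : pvStepB n fb (x, s, L) = fb := by
          simp [pvStepB, hx]
        rw [hB]
        exact ih rest' hlenr (s + L) n (by rw [hn, hlen2]; ring) fb idx

-- ===== VERDICT (by name: the statement is the Claim_ definition above) =====
theorem count_free_blocks_spec : Claim_equal_count_free_blocks := by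
  intro disk _
  unfold Spec_count_free_blocks count_free_blocks count_free_blocks_alt
  have hbridge : (PySem.List.pyRange 0 (disk.length : Int) 1).foldl
      (fun st i => pvStepA st (i, PySem.List.pyGetD disk i ""))
      (PySem.Dict.empty, 0, 0)
      = (PySem.List.enumerate disk 0).foldl pvStepA (PySem.Dict.empty, 0, 0) := by
    rw [PySem.List.enumerate_eq_map_pyRange disk "", List.foldl_map]
    rfl
  rw [hbridge, pvMain disk.length disk le_rfl 0 (disk.length : Int) (by simp)]
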